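-- pv_equiv track=rewrite | github.com/2kilometer/CodingTest | 프로그래머스/unrated/120956. 옹알이 （1）/옹알이 （1）.py | solution
-- ===== SOURCE A (Python) =====
-- from itertools import permutations
--
-- def solution(babbling):
--     bablings = ["aya", "ye", "woo", "ma"]
--     bablings_2 = ["".join(v) for v in list(permutations(bablings, 2))]
--     bablings_3 = ["".join(v) for v in list(permutations(bablings, 3))]
--     bablings_4 = ["".join(v) for v in list(permutations(bablings, 4))]
--     bablings += bablings_2
--     bablings += bablings_3
--     bablings += bablings_4
--
--     answer = len([b for b in babbling if b in bablings])
--     return answer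
-- ===== SOURCE B (Python) =====
-- def solution(babbling):
--     tokens = ("aya", "ye", "woo", "ma")
--
--     def valid(word):
--         used = set()
--         i = 0
--         n = len(word)
--         while i < n:
--             for t in tokens:
--                 if word.startswith(t, i):
--                     if t in used:
--                         return False
--                     used.add(t)
--                     i += len(t)
--                     break
--             else:
--                 return False
--         return bool(used)
--
--     return sum(valid(w) for w in babbling)
-- ===== Notes on version B (the rewrite author's own statement) =====
-- stated objective: alternative
-- what changed: Replaces A's precomputed table of all 64 permutation-concatenations plus per-word membership scan by a left-to-right greedy tokenizer with a used-token set (sound because the four tokens start with distinct letters).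
import Mathlib
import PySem

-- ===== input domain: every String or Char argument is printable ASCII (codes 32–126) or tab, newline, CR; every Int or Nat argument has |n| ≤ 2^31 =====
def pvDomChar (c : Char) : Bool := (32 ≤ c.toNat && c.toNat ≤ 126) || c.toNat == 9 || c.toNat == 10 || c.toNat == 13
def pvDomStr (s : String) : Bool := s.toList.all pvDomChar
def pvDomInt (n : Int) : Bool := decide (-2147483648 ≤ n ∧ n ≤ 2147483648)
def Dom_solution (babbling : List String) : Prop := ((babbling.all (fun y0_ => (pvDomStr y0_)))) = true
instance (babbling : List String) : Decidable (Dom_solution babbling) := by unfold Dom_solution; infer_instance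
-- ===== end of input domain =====

-- B replaces A's precomputed table of 64 permutation-concatenations + per-word membership
-- scan by a left-to-right greedy tokenizer with a used-token set (objective: alternative).
-- Strings are modelled as their character lists (String equality = char-list equality).

-- ===== PORT A =====
-- the four babbling tokens, as character lists
def tokA : List Char := ['a', 'y', 'a']
def tokY : List Char := ['y', 'e']
def tokW : List Char := ['w', 'o', 'o']
def tokM : List Char := ['m', 'a']

def bablingsBase : List (List Char) := [tokA, tokY, tokW, tokM]

-- bablings = base + joins of permutations of sizes 2, 3, 4 ("".join = List.flatten)
def bablingsAll : List (List Char) :=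
  bablingsBase
    ++ (PySem.List.permutations bablingsBase 2).map List.flatten
    ++ (PySem.List.permutations bablingsBase 3).map List.flatten
    ++ (PySem.List.permutations bablingsBase 4).map List.flatten

def solution (babbling : List String) : Int :=
  ((babbling.filter (fun b => bablingsAll.contains b.toList)).length : Int)

-- ===== PORT B =====
-- the inner `for t in tokens: if word.startswith(t, i)` loop: first token matching at the
-- current position (tokens checked in the tuple order of Source B)
def firstMatch (w : List Char) : Option (List Char) :=
  if tokA.isPrefixOf w then some tokA
  else if tokY.isPrefixOf w then some tokY
  else if tokW.isPrefixOf w then some tokW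
  else if tokM.isPrefixOf w then some tokM
  else none

-- the while loop of Source B's `valid`, with fuel = |word| as a structural totality guard
-- (each iteration consumes ≥ 2 characters, so the fuel never runs out; exact otherwise)
def greedyFuel : Nat → List Char → PySem.Set (List Char) → Bool
  | _, [], used => !used.isEmpty          -- return bool(used)
  | 0, _ :: _, _ => false                  -- unreachable (fuel ≥ remaining length)
  | fuel + 1, c :: cs, used =>
    match firstMatch (c :: cs) with
    | none => false
    | some t =>
      if PySem.Set.contains used t then false
      else greedyFuel fuel ((c :: cs).drop t.length) (PySem.Set.add used t)

def pyValid (w : List Char) : Bool := greedyFuel w.length w PySem.Set.empty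

def solution_alt (babbling : List String) : Int :=
  babbling.foldl (fun acc w => acc + (if pyValid w.toList then 1 else 0)) 0

-- ===== PRECONDITION & SPEC =====
def Spec_solution (babbling : List String) (out : Int) : Prop := out = solution_alt babbling
instance (babbling : List String) (out : Int) : Decidable (Spec_solution babbling out) := by unfold Spec_solution; infer_instance

-- ===== CLAIM (what is proved, stated in full; the proofs are below) =====
def Claim_equal_solution : Prop := ∀ (babbling : List String), Dom_solution babbling → Spec_solution babbling (solution babbling)

-- ===== LEMMAS AND PROOFS =====

-- firstMatch returns one of the four tokens, and that token is a prefix of the input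
lemma firstMatch_cases {w t : List Char} (h : firstMatch w = some t) :
    t ∈ bablingsBase ∧ t.isPrefixOf w = true := by
  unfold firstMatch at h
  split_ifs at h <;> simp_all [bablingsBase]

lemma mem_base_cases {t : List Char} (h : t ∈ bablingsBase) :
    t = tokA ∨ t = tokY ∨ t = tokW ∨ t = tokM := by simpa [bablingsBase] using h

lemma firstMatch_len {w t : List Char} (h : firstMatch w = some t) : 2 ≤ t.length := by
  rcases mem_base_cases (firstMatch_cases h).1 with rfl | rfl | rfl | rfl <;>
    simp [tokA, tokY, tokW, tokM]

-- the four tokens start with pairwise distinct letters, so the greedy match is unique: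
-- on t ++ r with t a token, firstMatch returns exactly t
lemma firstMatch_token {t : List Char} (ht : t ∈ bablingsBase) (r : List Char) :
    firstMatch (t ++ r) = some t := by
  rcases mem_base_cases ht with rfl | rfl | rfl | rfl <;>
    simp [firstMatch, tokA, tokY, tokW, tokM, List.isPrefixOf]

lemma set_add_not_empty {α : Type} [BEq α] (s : PySem.Set α) (x : α) :
    (PySem.Set.add s x).isEmpty = false := by
  unfold PySem.Set.add
  split
  · rename_i h
    cases s with
    | nil => simp [PySem.Set.contains] at h
    | cons a l => simp
  · cases s <;> simp

-- characterization of the greedy loop: it accepts exactly the concatenations of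
-- pairwise-distinct tokens avoiding `used` (nonempty when `used` starts empty)
lemma greedy_nil_iff (fuel : Nat) (used : PySem.Set (List Char)) :
    (greedyFuel fuel [] used = true ↔
      ∃ ts : List (List Char), ts.flatten = ([] : List Char) ∧ (∀ t ∈ ts, t ∈ bablingsBase) ∧
        ts.Nodup ∧ (∀ t ∈ ts, t ∉ used) ∧ (used.isEmpty → ts ≠ [])) := by
  have hg : greedyFuel fuel [] used = !used.isEmpty := by cases fuel <;> rfl
  rw [hg]
  constructor
  · intro h
    refine ⟨[], by simp, by simp, by simp, by simp, ?_⟩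
    intro he
    simp [he] at h
  · rintro ⟨ts, hflat, hmem, -, -, hne⟩
    cases ts with
    | nil =>
      simp only [Bool.not_eq_true']
      rw [Bool.eq_false_iff]
      intro he
      exact hne he rfl
    | cons t ts' =>
      exfalso
      have ht : t = [] := by
        have h0 : t ++ ts'.flatten = [] := by simpa using hflat
        exact (List.append_eq_nil_iff.mp h0).1
      rcases mem_base_cases (hmem t (by simp)) with rfl | rfl | rfl | rfl <;>
        simp [tokA, tokY, tokW, tokM] at ht

-- characterization of the greedy loop: it accepts exactly the concatenations of
-- pairwise-distinct tokens avoiding `used` (nonempty when `used` starts empty)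
lemma greedyFuel_iff : ∀ (fuel : Nat) (l : List Char) (used : PySem.Set (List Char)),
    l.length ≤ fuel →
    (greedyFuel fuel l used = true ↔
      ∃ ts : List (List Char), ts.flatten = l ∧ (∀ t ∈ ts, t ∈ bablingsBase) ∧ ts.Nodup ∧
        (∀ t ∈ ts, t ∉ used) ∧ (used.isEmpty → ts ≠ [])) := by
  intro fuel
  induction fuel with
  | zero =>
    intro l used hlen
    have hnil : l = [] := List.length_eq_zero_iff.mp (Nat.le_zero.mp hlen)
    subst hnil
    exact greedy_nil_iff 0 used
  | succ fuel ih =>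
    intro l used hlen
    cases l with
    | nil => exact greedy_nil_iff _ used
    | cons c cs =>
      constructor
      · intro h
        rw [greedyFuel] at h
        cases hfm : firstMatch (c :: cs) with
        | none => simp [hfm] at h
        | some t =>
          rw [hfm] at h
          obtain ⟨htmem, hpref⟩ := firstMatch_cases hfm
          obtain ⟨r, hr⟩ := List.isPrefixOf_iff_prefix.mp hpref
          by_cases hc : PySem.Set.contains used t
          · simp at h
            exact absurd (List.contains_iff_mem.mp hc) h.1
          · simp only [hc] at h
            have hdrop : (c :: cs).drop t.length = r := by rw [← hr]; exact List.drop_left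
            rw [hdrop] at h
            have hrlen : r.length ≤ fuel := by
              have h2 := firstMatch_len hfm
              have h3 := congrArg List.length hr
              simp [List.length_append] at h3
              simp only [List.length_cons] at hlen
              omega
            obtain ⟨ts', hflat', hmem', hnd', hnotin', -⟩ := (ih r _ hrlen).mp h
            refine ⟨t :: ts', by simp [hflat', hr], ?_, ?_, ?_, by simp⟩
            · intro x hx
              rcases List.mem_cons.mp hx with rfl | hx
              · exact htmem
              · exact hmem' x hx
            · refine List.nodup_cons.mpr ⟨?_, hnd'⟩
              intro hcontra
              exact hnotin' t hcontra ((PySem.Set.mem_add used t t).mpr (Or.inr rfl))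
            · intro x hx
              rcases List.mem_cons.mp hx with rfl | hx
              · intro hxin
                exact hc ((List.contains_iff_mem).mpr hxin)
              · intro hxin
                exact hnotin' x hx ((PySem.Set.mem_add used t x).mpr (Or.inl hxin))
      · rintro ⟨ts, hflat, hmem, hnd, hnotin, -⟩
        cases ts with
        | nil => simp at hflat
        | cons t ts' =>
          have htmem := hmem t (by simp)
          have hflat' : t ++ ts'.flatten = c :: cs := by simpa using hflat
          have hfm : firstMatch (c :: cs) = some t := by
            rw [← hflat']; exact firstMatch_token htmem _
          rw [greedyFuel, hfm]
          have hc : PySem.Set.contains used t = false := by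
            rw [Bool.eq_false_iff]
            intro hcon
            exact hnotin t (by simp) (List.contains_iff_mem.mp hcon)
          simp only [hc]
          have hdrop : (c :: cs).drop t.length = ts'.flatten := by
            rw [← hflat']; exact List.drop_left
          rw [hdrop]
          have hrlen : ts'.flatten.length ≤ fuel := by
            have h2 := firstMatch_len hfm
            have h3 := congrArg List.length hflat'
            simp [List.length_append] at h3
            simp only [List.length_cons] at hlen
            simp only [List.length_flatten]
            omega
          refine (ih _ _ hrlen).mpr ⟨ts', rfl, fun x hx => hmem x (by simp [hx]), ?_, ?_, ?_⟩
          · exact (List.nodup_cons.mp hnd).2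
          · intro x hx hxin
            rcases (PySem.Set.mem_add used t x).mp hxin with h' | h'
            · exact hnotin x (by simp [hx]) h'
            · exact (List.nodup_cons.mp hnd).1 (h' ▸ hx)
          · rw [set_add_not_empty]
            simp

-- every word of A's 64-element table passes B's greedy check (finite check)
lemma all_bablings_valid :
    bablingsAll.all (fun w => greedyFuel w.length w PySem.Set.empty) = true := by decide

-- concatenations of 1–4 pairwise-distinct tokens are in A's table (finite checks)
lemma flat1 : ∀ a ∈ bablingsBase, List.flatten [a] ∈ bablingsAll := by decide
lemma flat2 : ∀ a ∈ bablingsBase, ∀ b ∈ bablingsBase, a ≠ b →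
    List.flatten [a, b] ∈ bablingsAll := by decide
lemma flat3 : ∀ a ∈ bablingsBase, ∀ b ∈ bablingsBase, ∀ c ∈ bablingsBase,
    a ≠ b → a ≠ c → b ≠ c → List.flatten [a, b, c] ∈ bablingsAll := by decide
lemma flat4 : ∀ a ∈ bablingsBase, ∀ b ∈ bablingsBase, ∀ c ∈ bablingsBase, ∀ d ∈ bablingsBase,
    a ≠ b → a ≠ c → a ≠ d → b ≠ c → b ≠ d → c ≠ d →
    List.flatten [a, b, c, d] ∈ bablingsAll := by decide

-- pointwise agreement of A's membership test and B's greedy check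
lemma point (l : List Char) : bablingsAll.contains l = pyValid l := by
  rcases hb : pyValid l with _ | _
  · rw [Bool.eq_false_iff]
    intro hcon
    have hm := List.contains_iff_mem.mp hcon
    have := (List.all_eq_true.mp all_bablings_valid) l hm
    simp only [pyValid] at hb
    simp_all
  · obtain ⟨ts, hflat, hmem, hnd, -, hne⟩ :=
      (greedyFuel_iff l.length l PySem.Set.empty le_rfl).mp hb
    have hlen4 : ts.length ≤ 4 := by
      have := (List.Nodup.subperm hnd hmem).length_le
      simpa [bablingsBase] using this
    subst hflat
    apply List.contains_iff_mem.mpr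
    match ts, hlen4 with
    | [], _ => exact absurd rfl (hne (by simp [PySem.Set.empty]))
    | [a], _ => exact flat1 a (hmem a (by simp))
    | [a, b], _ =>
      exact flat2 a (hmem a (by simp)) b (hmem b (by simp))
        (by simp [List.nodup_cons] at hnd; tauto)
    | [a, b, c], _ =>
      have h' : a ≠ b ∧ a ≠ c ∧ b ≠ c := by
        simp [List.nodup_cons] at hnd; tauto
      exact flat3 a (hmem a (by simp)) b (hmem b (by simp)) c (hmem c (by simp))
        h'.1 h'.2.1 h'.2.2
    | [a, b, c, d], _ =>
      have h' : a ≠ b ∧ a ≠ c ∧ a ≠ d ∧ b ≠ c ∧ b ≠ d ∧ c ≠ d := by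
        simp [List.nodup_cons] at hnd; tauto
      exact flat4 a (hmem a (by simp)) b (hmem b (by simp)) c (hmem c (by simp))
        d (hmem d (by simp)) h'.1 h'.2.1 h'.2.2.1 h'.2.2.2.1 h'.2.2.2.2.1 h'.2.2.2.2.2

-- ===== VERDICT (by name: the statement is the Claim_ definition above) =====
theorem solution_spec : Claim_equal_solution := by
  intro babbling _
  unfold Spec_solution solution solution_alt
  have hfun : (fun (acc : Int) (w : String) => acc + (if pyValid w.toList then 1 else 0)) =
      (fun acc w => if (fun w : String => pyValid w.toList) w then acc + 1 else acc) := by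
    funext acc w
    split <;> simp
  rw [hfun, PySem.List.foldl_count_if]
  have hcong : babbling.countP (fun w : String => pyValid w.toList) =
      babbling.countP (fun b : String => bablingsAll.contains b.toList) := by
    apply List.countP_congr
    intro x _
    rw [point]
  rw [hcong]
  simp [List.countP_eq_length_filter]
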